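-- pv_equiv track=rewrite | github.com/Valokoodari/advent-of-code | 2021/22.py | fgd
-- ===== SOURCE A (Python) =====
-- def fgd(c, i):
--     cs = [
--         (c[0], i[0]-1, c[2], c[3], c[4], c[5]),
--         (i[1]+1, c[1], c[2], c[3], c[4], c[5]),
--         (i[0], i[1], c[2], i[2]-1, c[4], c[5]),
--         (i[0], i[1], i[3]+1, c[3], c[4], c[5]),
--         (i[0], i[1], i[2], i[3], c[4], i[4]-1),
--         (i[0], i[1], i[2], i[3], i[5]+1, c[5]),
--     ]
--     return [x for x in cs if x[0] <= x[1] and x[2] <= x[3] and x[4] <= x[5]]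
-- ===== SOURCE B (Python) =====
-- def fgd(c, i):
--     # Recursive decomposition over the axes: peel off one axis at a time,
--     # emit the low/high slab for that axis (suffix axes keep c's bounds),
--     # and prepend the intersection interval to every box produced for the
--     # remaining axes.  Boxes are built back-to-front by the recursion.
--     def split(ax):
--         if not ax:
--             return []
--         cl, ch, il, ih = ax[0]
--         rest = ax[1:]
--         rest_c = [(a, b) for (a, b, _, _) in rest]
--         rest_ok = all(a <= b for (a, b) in rest_c)
--         out = []
--         if cl <= il - 1 and rest_ok:
--             out.append([(cl, il - 1)] + rest_c)
--         if ih + 1 <= ch and rest_ok: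
--             out.append([(ih + 1, ch)] + rest_c)
--         if il <= ih:
--             out.extend([(il, ih)] + box for box in split(rest))
--         return out
--     axes = [(c[2 * k], c[2 * k + 1], i[2 * k], i[2 * k + 1]) for k in range(3)]
--     return [tuple(v for p in box for v in p) for box in split(axes)]
-- ===== Notes on version B (the rewrite author's own statement) =====
-- stated objective: alternative
-- what changed: Replaces A's hard-coded six-candidate list plus a single filter with a recursion over the list of axes that peels one axis at a time, emits its low/high slab (checking validity incrementally: slab nonempty plus remaining c-intervals nonempty), prunes whole subtrees when an intersection interval is empty, and prepends the intersection interval to the recursively built boxes for the remaining axes.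
import Mathlib
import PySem

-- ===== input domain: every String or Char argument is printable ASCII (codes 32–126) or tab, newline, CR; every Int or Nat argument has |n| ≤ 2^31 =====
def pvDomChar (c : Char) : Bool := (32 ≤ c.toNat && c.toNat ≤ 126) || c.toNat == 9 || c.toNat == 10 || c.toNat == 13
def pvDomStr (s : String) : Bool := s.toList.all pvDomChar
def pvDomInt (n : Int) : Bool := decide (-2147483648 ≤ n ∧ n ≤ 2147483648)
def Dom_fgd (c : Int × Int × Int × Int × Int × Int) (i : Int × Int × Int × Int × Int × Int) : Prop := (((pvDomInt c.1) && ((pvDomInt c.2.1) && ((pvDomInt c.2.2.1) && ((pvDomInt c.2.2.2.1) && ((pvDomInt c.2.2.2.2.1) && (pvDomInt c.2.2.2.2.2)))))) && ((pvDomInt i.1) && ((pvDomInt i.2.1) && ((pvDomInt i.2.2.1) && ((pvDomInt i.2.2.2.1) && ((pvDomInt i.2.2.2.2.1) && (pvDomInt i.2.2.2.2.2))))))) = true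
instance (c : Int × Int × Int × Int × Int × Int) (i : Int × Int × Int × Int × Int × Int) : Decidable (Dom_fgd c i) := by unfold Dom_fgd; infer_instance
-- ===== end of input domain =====

-- B: recursive axis-by-axis decomposition building boxes back-to-front (peel one axis, emit its two slabs, recurse on the intersection interval list), replacing A's hard-coded six-candidate list + filter; same values, order and filter.


-- ===== PORT A =====
def fgd (c : Int × Int × Int × Int × Int × Int) (i : Int × Int × Int × Int × Int × Int) : List (Int × Int × Int × Int × Int × Int) :=
  match c, i with
  | (c0, c1, c2, c3, c4, c5), (i0, i1, i2, i3, i4, i5) =>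
    let cs : List (Int × Int × Int × Int × Int × Int) :=
      [ (c0, i0 - 1, c2, c3, c4, c5),
        (i1 + 1, c1, c2, c3, c4, c5),
        (i0, i1, c2, i2 - 1, c4, c5),
        (i0, i1, i3 + 1, c3, c4, c5),
        (i0, i1, i2, i3, c4, i4 - 1),
        (i0, i1, i2, i3, i5 + 1, c5) ]
    cs.filter (fun x => x.1 ≤ x.2.1 && x.2.2.1 ≤ x.2.2.2.1 && x.2.2.2.2.1 ≤ x.2.2.2.2.2)

-- ===== PORT B =====
-- B-side helper: recursion over the list of axes ((c_lo, c_hi, i_lo, i_hi) per axis),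
-- producing boxes as lists of (lo, hi) intervals, built back-to-front (Source B's `split`).
def pvSplit : List (Int × Int × Int × Int) → List (List (Int × Int))
  | [] => []
  | (cl, ch, il, ih) :: rest =>
    let restC := rest.map (fun q => (q.1, q.2.1))
    let restOk := restC.all (fun p => decide (p.1 ≤ p.2))
    let out1 := if cl ≤ il - 1 ∧ restOk = true then [(cl, il - 1) :: restC] else []
    let out2 := if ih + 1 ≤ ch ∧ restOk = true then [(ih + 1, ch) :: restC] else []
    let out3 := if il ≤ ih then (pvSplit rest).map (fun b => (il, ih) :: b) else []
    out1 ++ (out2 ++ out3)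

-- B-side helper: flatten one 3-interval box into a 6-tuple (Source B's final tuple(...));
-- the catch-all arm is unreachable for boxes produced by pvSplit on three axes.
def pvFlat : List (Int × Int) → Int × Int × Int × Int × Int × Int
  | [(a, b), (c, d), (e, f)] => (a, b, c, d, e, f)
  | _ => (0, 0, 0, 0, 0, 0)

def fgd_alt (c : Int × Int × Int × Int × Int × Int) (i : Int × Int × Int × Int × Int × Int) : List (Int × Int × Int × Int × Int × Int) :=
  match c, i with
  | (c0, c1, c2, c3, c4, c5), (i0, i1, i2, i3, i4, i5) =>
    (pvSplit [(c0, c1, i0, i1), (c2, c3, i2, i3), (c4, c5, i4, i5)]).map pvFlat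

-- ===== PRECONDITION & SPEC =====
def Spec_fgd (c : Int × Int × Int × Int × Int × Int) (i : Int × Int × Int × Int × Int × Int) (out : List (Int × Int × Int × Int × Int × Int)) : Prop := out = fgd_alt c i
instance (c : Int × Int × Int × Int × Int × Int) (i : Int × Int × Int × Int × Int × Int) (out : List (Int × Int × Int × Int × Int × Int)) : Decidable (Spec_fgd c i out) := by unfold Spec_fgd; infer_instance

-- ===== CLAIM (what is proved, stated in full; the proofs are below) =====
def Claim_equal_fgd : Prop := ∀ (c : Int × Int × Int × Int × Int × Int) (i : Int × Int × Int × Int × Int × Int), Dom_fgd c i → Spec_fgd c i (fgd c i)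

-- ===== LEMMAS AND PROOFS =====
theorem filter_cons_block {α} (p : α → Bool) (x : α) (l : List α) :
    List.filter p (x :: l) = (if p x = true then [x] else []) ++ List.filter p l := by
  by_cases h : p x <;> simp [h]

theorem map_ite_list {α β} (f : α → β) (P : Prop) [Decidable P] (X Y : List α) :
    List.map f (if P then X else Y) = if P then X.map f else Y.map f := by
  split_ifs <;> rfl

theorem ite_collapse {α} (P Q : Prop) [Decidable P] [Decidable Q] (x : List α) :
    (if P then (if Q then x else []) else []) = if P ∧ Q then x else [] := by
  split_ifs <;> simp_all

theorem ite_append_split {α} (P : Prop) [Decidable P] (X Y : List α) :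
    (if P then X ++ Y else []) = (if P then X else []) ++ (if P then Y else []) := by
  split_ifs <;> simp

-- ===== VERDICT (by name: the statement is the Claim_ definition above) =====
set_option maxHeartbeats 1000000 in
theorem fgd_spec : Claim_equal_fgd := by
  intro c i _
  obtain ⟨c0, c1, c2, c3, c4, c5⟩ := c
  obtain ⟨i0, i1, i2, i3, i4, i5⟩ := i
  show fgd _ _ = fgd_alt _ _
  simp only [fgd, fgd_alt, pvSplit, List.map_cons, List.map_nil, List.all_cons, List.all_nil,
    Bool.and_eq_true, decide_eq_true_eq, Bool.and_true, and_true,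
    filter_cons_block, List.filter_nil, List.append_nil,
    List.map_append, apply_ite (List.map pvFlat),
    ite_append_split, map_ite_list, ite_collapse, pvFlat, and_assoc,
    ite_self]
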